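-- pv_equiv track=rewrite | github.com/wwPDB/py-wwpdb_apps_releasemodule | wwpdb/apps/releasemodule/depict/ReleaseOption_v2.py | getReleaseManu
-- ===== SOURCE A (Python) =====
-- def getReleaseManu(name, value, val_list, js_class, include_empty_selection):
--     display_list = []
--     if include_empty_selection:
--         display_list = [['', '']]
--     #
--     for tup_list in val_list:
--         display_list.append(tup_list)
--     #
--     text = '<select name="' + name + '" id="' + name + '" ' + js_class + '>\n'
--     label = ''
--     for tup_list in display_list:
--         text += '<option value="' + tup_list[0] + '" '
--         if value == tup_list[0]:
--             text += 'selected'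
--             label = tup_list[1]
--         #
--         text += '>' + tup_list[1] + '</option>\n'
--     text += '</select> &nbsp; &nbsp; &nbsp;\n'
--     return text, label
-- ===== SOURCE B (Python) =====
-- def getReleaseManu(name, value, val_list, js_class, include_empty_selection):
--     def render(items):
--         # returns (options_html, label_or_None); recursion prefers the tail's
--         # label, so the LAST tuple whose key equals value wins (as intended).
--         if not items:
--             return '', None
--         head = items[0]
--         rest_body, rest_label = render(items[1:])
--         sel = head[0] == value
--         opt = '<option value="%s" %s>%s</option>\n' % (
--             head[0], 'selected' if sel else '', head[1])
--         label = rest_label if rest_label is not None else (head[1] if sel else None)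
--         return opt + rest_body, label
--
--     display = ([['', '']] if include_empty_selection else []) + list(val_list)
--     body, label = render(display)
--     text = '<select name="%s" id="%s" %s>\n%s</select> &nbsp; &nbsp; &nbsp;\n' % (
--         name, name, js_class, body)
--     return text, '' if label is None else label
-- ===== Notes on version B (the rewrite author's own statement) =====
-- stated objective: alternative
-- what changed: A accumulates HTML and label mutably in one forward loop; B renders the option list by structural recursion that returns (options_html, Optional[label]) bottom-up, preferring the tail's label so the last match wins, and fills a %s template for the wrapper.
import Mathlib
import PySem

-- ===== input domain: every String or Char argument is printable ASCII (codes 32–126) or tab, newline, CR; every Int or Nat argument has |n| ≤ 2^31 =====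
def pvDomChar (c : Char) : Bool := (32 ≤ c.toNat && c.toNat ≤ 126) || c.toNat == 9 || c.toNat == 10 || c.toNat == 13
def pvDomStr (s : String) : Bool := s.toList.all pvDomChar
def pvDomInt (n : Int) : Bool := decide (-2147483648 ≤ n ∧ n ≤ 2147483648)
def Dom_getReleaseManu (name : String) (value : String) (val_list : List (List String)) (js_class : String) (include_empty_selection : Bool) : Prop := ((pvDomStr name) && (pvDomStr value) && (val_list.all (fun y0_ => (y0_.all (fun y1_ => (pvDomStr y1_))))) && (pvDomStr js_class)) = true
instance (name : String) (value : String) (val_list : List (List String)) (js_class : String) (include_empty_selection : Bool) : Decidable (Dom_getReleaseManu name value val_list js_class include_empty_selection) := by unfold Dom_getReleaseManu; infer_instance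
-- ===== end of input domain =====

-- ===== PORT A =====
-- B replaces A's mutable forward loop by a structural recursion returning (options_html, Option label).
-- tup[i] for i = 0,1; exact where the index is in range (Pre_ guarantees that)
def pvGet (t : List String) (i : Int) : String := (PySem.List.pyGet? t i).getD ""

def getReleaseManu (name : String) (value : String) (val_list : List (List String)) (js_class : String) (include_empty_selection : Bool) : String × String :=
  let display_list : List (List String) := if include_empty_selection then [["", ""]] else []
  let display_list := val_list.foldl (fun acc t => acc ++ [t]) display_list
  let text := "<select name=\"" ++ name ++ "\" id=\"" ++ name ++ "\" " ++ js_class ++ ">\n"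
  let st := display_list.foldl (fun (st : String × String) t =>
      let text := st.1 ++ "<option value=\"" ++ pvGet t 0 ++ "\" "
      let st2 := if value = pvGet t 0 then (text ++ "selected", pvGet t 1) else (text, st.2)
      (st2.1 ++ ">" ++ pvGet t 1 ++ "</option>\n", st2.2)) (text, "")
  (st.1 ++ "</select> &nbsp; &nbsp; &nbsp;\n", st.2)

-- ===== PORT B =====
-- recursive render: returns (options html, optional label); tail's label preferred (last match wins)
def pvRender (value : String) : List (List String) → String × Option String
  | [] => ("", none)
  | h :: t =>
    let r := pvRender value t
    let sel := pvGet h 0 = value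
    let opt := "<option value=\"" ++ pvGet h 0 ++ "\" " ++ (if sel then "selected" else "") ++ ">" ++ pvGet h 1 ++ "</option>\n"
    (opt ++ r.1, match r.2 with
      | some l => some l
      | none => if sel then some (pvGet h 1) else none)

def getReleaseManu_alt (name : String) (value : String) (val_list : List (List String)) (js_class : String) (include_empty_selection : Bool) : String × String :=
  let display := (if include_empty_selection then [["", ""]] else []) ++ val_list
  let r := pvRender value display
  ("<select name=\"" ++ name ++ "\" id=\"" ++ name ++ "\" " ++ js_class ++ ">\n" ++ r.1 ++ "</select> &nbsp; &nbsp; &nbsp;\n",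
   (r.2).getD "")

-- ===== PRECONDITION & SPEC =====
-- Pre_ excludes exactly the inputs where Python A raises IndexError (an inner list with fewer than 2 entries); B raises there too.
def Pre_getReleaseManu (name : String) (value : String) (val_list : List (List String)) (js_class : String) (include_empty_selection : Bool) : Prop :=
  ∀ t ∈ val_list, 2 ≤ t.length
instance (name : String) (value : String) (val_list : List (List String)) (js_class : String) (include_empty_selection : Bool) : Decidable (Pre_getReleaseManu name value val_list js_class include_empty_selection) := by unfold Pre_getReleaseManu; infer_instance

def pvWitness_getReleaseManu : String × String × List (List String) × String × Bool :=
  ("n", "a", [["a", "Alpha"], ["b", "Beta"]], "class=\"c\"", true)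

def Spec_getReleaseManu (name : String) (value : String) (val_list : List (List String)) (js_class : String) (include_empty_selection : Bool) (out : String × String) : Prop := out = getReleaseManu_alt name value val_list js_class include_empty_selection
instance (name : String) (value : String) (val_list : List (List String)) (js_class : String) (include_empty_selection : Bool) (out : String × String) : Decidable (Spec_getReleaseManu name value val_list js_class include_empty_selection out) := by unfold Spec_getReleaseManu; infer_instance

-- ===== CLAIM (what is proved, stated in full; the proofs are below) =====
def Claim_equal_getReleaseManu : Prop := ∀ (name : String) (value : String) (val_list : List (List String)) (js_class : String) (include_empty_selection : Bool), Dom_getReleaseManu name value val_list js_class include_empty_selection → Pre_getReleaseManu name value val_list js_class include_empty_selection → Spec_getReleaseManu name value val_list js_class include_empty_selection (getReleaseManu name value val_list js_class include_empty_selection)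

-- ===== LEMMAS AND PROOFS =====
theorem pv_foldl_snoc (l : List (List String)) (init : List (List String)) :
    l.foldl (fun acc t => acc ++ [t]) init = init ++ l := by
  induction l generalizing init with
  | nil => simp
  | cons x xs ih => simp [List.foldl_cons, ih]

theorem pv_loop_eq (value : String) (l : List (List String)) (s lab : String) :
    l.foldl (fun (st : String × String) t =>
      let text := st.1 ++ "<option value=\"" ++ pvGet t 0 ++ "\" "
      let st2 := if value = pvGet t 0 then (text ++ "selected", pvGet t 1) else (text, st.2)
      (st2.1 ++ ">" ++ pvGet t 1 ++ "</option>\n", st2.2)) (s, lab)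
    = (s ++ (pvRender value l).1, ((pvRender value l).2).getD lab) := by
  induction l generalizing s lab with
  | nil => simp [pvRender]
  | cons x xs ih =>
    simp only [List.foldl_cons, pvRender]
    by_cases h : value = pvGet x 0
    · rw [if_pos h, if_pos h.symm, ih]
      cases hr : (pvRender value xs).2 <;>
        exact Prod.ext (by simp [String.append_assoc]) (by simp [hr, h.symm])
    · have h' : ¬ pvGet x 0 = value := fun e => h e.symm
      rw [if_neg h, if_neg h', ih]
      cases hr : (pvRender value xs).2 <;>
        exact Prod.ext (by simp [String.append_assoc]) (by simp [hr, h'])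

-- ===== VERDICT (by name: the statement is the Claim_ definition above) =====
theorem getReleaseManu_spec : Claim_equal_getReleaseManu := by
  intro name value val_list js_class inc _ _
  unfold Spec_getReleaseManu getReleaseManu getReleaseManu_alt
  simp only [pv_foldl_snoc, pv_loop_eq]
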